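-- pv_equiv track=rewrite | github.com/The-devop/Cipher-Labs | crypto_core.py | pyramid_cipher
-- ===== SOURCE A (Python) =====
-- def _clean(text: str) -> str:
--     """Convert text to uppercase"""
--     return text.upper()
--
-- def pyramid_cipher(text: str) -> str:
--     """Arrange in pyramid and read diagonally"""
--     text = _clean(text).replace(" ", "")
--     pyramid = []
--     idx = 0
--     row = 1
--     while idx < len(text):
--         pyramid.append(text[idx:idx+row])
--         idx += row
--         row += 1
--     result = []
--     for i in range(len(pyramid)):
--         for j in range(len(pyramid[i])):
--             if i <= j:
--                 result.append(pyramid[i][j])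
--     return "".join(result)
-- ===== SOURCE B (Python) =====
-- def _clean(text: str) -> str:
--     """Convert text to uppercase"""
--     return text.upper()
--
-- def pyramid_cipher(text: str) -> str:
--     """Read the pyramid diagonal via the closed-form index i*(i+3)//2, no pyramid built."""
--     text = _clean(text).replace(" ", "")
--     n = len(text)
--     out = []
--     i = 0
--     while i * (i + 3) // 2 < n:
--         out.append(text[i * (i + 3) // 2])
--         i += 1
--     return "".join(out)
-- ===== Notes on version B (the rewrite author's own statement) =====
-- stated objective: faster
-- what changed: B never builds the pyramid row list or the nested index loops: it reads the diagonal characters directly from the cleaned text at the closed-form indices i*(i+3)//2, so after the O(n) cleaning it does only O(sqrt n) loop iterations instead of A's O(n) slicing and scanning work.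
import Mathlib
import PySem

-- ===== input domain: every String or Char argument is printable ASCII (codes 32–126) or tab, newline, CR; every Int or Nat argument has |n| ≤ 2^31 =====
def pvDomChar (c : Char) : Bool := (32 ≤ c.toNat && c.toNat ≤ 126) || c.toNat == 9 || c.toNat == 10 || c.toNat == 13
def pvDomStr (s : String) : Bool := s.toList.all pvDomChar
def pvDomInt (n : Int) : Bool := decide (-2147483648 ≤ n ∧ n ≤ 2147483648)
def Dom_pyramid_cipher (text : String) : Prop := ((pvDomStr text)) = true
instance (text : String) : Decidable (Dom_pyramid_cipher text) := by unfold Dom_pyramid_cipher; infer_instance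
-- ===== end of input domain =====

-- B reads the pyramid's diagonal directly at the closed-form indices i*(i+3)/2 instead of
-- building the row list and scanning it with nested index loops (objective: simpler).

-- ===== PORT A =====

-- the while loop building `pyramid` (text[idx:idx+row] appended, idx += row, row += 1);
-- the `0 < row` conjunct only makes termination evident — the loop is entered with row = 1
def buildPyr (s : List Char) (idx row : Nat) : List (List Char) :=
  if idx < s.length ∧ 0 < row then
    PySem.List.slice s (some (idx : Int)) (some ((idx : Int) + (row : Int))) ::
      buildPyr s (idx + row) (row + 1)
  else []
  termination_by s.length - idx
  decreasing_by omega

def pyramid_cipher (text : String) : String :=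
  let t := PySem.Str.replace (PySem.Str.upper text) " " ""
  let s := t.toList
  let pyr := buildPyr s 0 1
  let result := (PySem.List.pyRange 0 (pyr.length : Int) 1).foldl (fun acc i =>
      (PySem.List.pyRange 0 ((PySem.List.pyGetD pyr i []).length : Int) 1).foldl (fun acc2 j =>
          if i ≤ j then acc2 ++ [PySem.List.pyGetD (PySem.List.pyGetD pyr i []) j ' '] else acc2)
        acc) []
  String.ofList result

-- ===== PORT B =====

-- the while loop of Source B: append text[i*(i+3)//2] while that index is < n
def goB (s : List Char) (i : Nat) : List Char :=
  if i * (i + 3) / 2 < s.length then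
    s.getD (i * (i + 3) / 2) ' ' :: goB s (i + 1)
  else []
  termination_by s.length - i * (i + 3) / 2
  decreasing_by
    have h : (i + 1) * (i + 1 + 3) = i * (i + 3) + (i + 2) * 2 := by ring
    have h2 : (i + 1) * (i + 1 + 3) / 2 = i * (i + 3) / 2 + (i + 2) := by
      rw [h, Nat.add_mul_div_right _ _ (by omega : 0 < 2)]
    omega

def pyramid_cipher_alt (text : String) : String :=
  let s := (PySem.Str.replace (PySem.Str.upper text) " " "").toList
  String.ofList (goB s 0)

-- ===== PRECONDITION & SPEC =====
def Spec_pyramid_cipher (text : String) (out : String) : Prop := out = pyramid_cipher_alt text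
instance (text : String) (out : String) : Decidable (Spec_pyramid_cipher text out) := by unfold Spec_pyramid_cipher; infer_instance

-- ===== CLAIM (what is proved, stated in full; the proofs are below) =====
def Claim_equal_pyramid_cipher : Prop := ∀ (text : String), Dom_pyramid_cipher text → Spec_pyramid_cipher text (pyramid_cipher text)

-- ===== LEMMAS AND PROOFS =====

-- the diagonal read A's nested loops perform: from row k onward, row k contributes its drop k
def diag (l : List (List Char)) (k : Nat) : List Char :=
  match l with
  | [] => []
  | r :: rs => r.drop k ++ diag rs (k + 1)

-- goB with the running start index made explicit (idx stands for i*(i+1)/2)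
def goGen (s : List Char) (idx k : Nat) : List Char :=
  if idx + k < s.length then s.getD (idx + k) ' ' :: goGen s (idx + k + 1) (k + 1)
  else []
  termination_by s.length - idx
  decreasing_by omega

lemma diag_append (l : List (List Char)) (r : List Char) (k : Nat) :
    diag (l ++ [r]) k = diag l k ++ r.drop (k + l.length) := by
  induction l generalizing k with
  | nil => simp [diag]
  | cons x xs ih =>
      simp only [List.cons_append, diag, ih, List.length_cons, List.append_assoc]
      ring_nf

-- A's inner loop over row appends exactly the elements of row at positions ≥ i
lemma inner_fold (n : Nat) (row : List Char) (i : Nat) (acc : List Char)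
    (hn : n ≤ row.length) :
    (PySem.List.pyRange 0 (n : Int) 1).foldl (fun a j =>
        if (i : Int) ≤ j then a ++ [PySem.List.pyGetD row j ' '] else a) acc
      = acc ++ (row.take n).drop i := by
  induction n generalizing acc with
  | zero => simp [PySem.List.pyRange_one_eq_nil]
  | succ m ih =>
      have hb : (0 : Int) ≤ (m : Int) := by exact_mod_cast Nat.zero_le m
      have : ((m + 1 : Nat) : Int) = (m : Int) + 1 := by push_cast; ring
      rw [this, PySem.List.pyRange_one_succ_right hb, List.foldl_append,
        ih _ (by omega)]
      have hm : m < row.length := by omega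
      have htake : row.take (m + 1) = row.take m ++ [row[m]] :=
        (List.take_append_getElem hm).symm
      simp only [List.foldl_cons, List.foldl_nil, PySem.List.pyGetD_natCast]
      by_cases hle : i ≤ m
      · rw [if_pos (by exact_mod_cast hle), htake]
        rw [List.drop_append_of_le_length (by simp [List.length_take]; omega)]
        simp [List.getD, hm]
      · rw [if_neg (by exact_mod_cast hle), htake]
        have h1 : (row.take m).drop i = [] := by
          apply List.drop_eq_nil_of_le; simp [List.length_take]; omega
        have h2 : ((row.take m ++ [row[m]]).drop i) = [] := by
          apply List.drop_eq_nil_of_le; simp [List.length_take]; omega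
        rw [h1, h2]

-- A's outer loop over the first m rows produces the diagonal of take m
lemma outer_fold (m : Nat) (pyr : List (List Char)) (acc : List Char)
    (hm : m ≤ pyr.length) :
    (PySem.List.pyRange 0 (m : Int) 1).foldl (fun acc i =>
        (PySem.List.pyRange 0 ((PySem.List.pyGetD pyr i []).length : Int) 1).foldl (fun acc2 j =>
            if i ≤ j then acc2 ++ [PySem.List.pyGetD (PySem.List.pyGetD pyr i []) j ' '] else acc2)
          acc) acc
      = acc ++ diag (pyr.take m) 0 := by
  induction m generalizing acc with
  | zero => simp [PySem.List.pyRange_one_eq_nil, diag]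
  | succ k ih =>
      have hb : (0 : Int) ≤ (k : Int) := by exact_mod_cast Nat.zero_le k
      have hcast : ((k + 1 : Nat) : Int) = (k : Int) + 1 := by push_cast; ring
      rw [hcast, PySem.List.pyRange_one_succ_right hb, List.foldl_append,
        ih _ (by omega)]
      have hk : k < pyr.length := by omega
      have hrow : PySem.List.pyGetD pyr (k : Int) [] = pyr[k] := by
        rw [PySem.List.pyGetD_natCast]
        simp [List.getD, List.getElem?_eq_getElem hk]
      simp only [List.foldl_cons, List.foldl_nil, hrow]
      rw [inner_fold _ _ _ _ (le_refl _)]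
      have htake : pyr.take (k + 1) = pyr.take k ++ [pyr[k]] :=
        (List.take_append_getElem hk).symm
      rw [htake, diag_append]
      simp [List.length_take, Nat.min_eq_left (le_of_lt hk)]

-- the diagonal of the pyramid built from position idx with width k+1 is goGen s idx k
lemma diag_buildPyr (s : List Char) (idx k : Nat) :
    diag (buildPyr s idx (k + 1)) k = goGen s idx k := by
  rw [buildPyr, goGen]
  by_cases h : idx < s.length
  · rw [if_pos ⟨h, by omega⟩]
    have hslice : PySem.List.slice s (some (idx : Int)) (some ((idx : Int) + ((k + 1 : Nat) : Int)))
        = (s.drop idx).take (k + 1) := by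
      rw [PySem.List.slice_toNat _ (by positivity) (by positivity),
        show ((idx : Int) + ((k + 1 : Nat) : Int)).toNat = idx + (k + 1) by push_cast; omega,
        Int.toNat_natCast, show idx + (k + 1) - idx = k + 1 by omega]
    rw [hslice]
    simp only [diag]
    rw [diag_buildPyr s (idx + (k + 1)) (k + 1)]
    by_cases h2 : idx + k < s.length
    · rw [if_pos h2]
      have hdrop : (((s.drop idx).take (k + 1)).drop k) = [s.getD (idx + k) ' '] := by
        have hlen : ((s.drop idx).take (k + 1)).length = k + 1 := by
          simp [List.length_take, List.length_drop]; omega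
        have t0 := (List.take_append_getElem (l := (s.drop idx).take (k + 1)) (i := k)
            (by rw [hlen]; omega)).symm
        rw [List.take_of_length_le (by rw [hlen])] at t0
        rw [t0, List.drop_append_of_le_length (by rw [List.length_take, hlen]; omega)]
        rw [List.drop_eq_nil_of_le (by rw [List.length_take, hlen]; omega), List.nil_append]
        congr 1
        rw [List.getElem_take, List.getElem_drop]
        simp [List.getD, List.getElem?_eq_getElem h2]
      rw [hdrop]
      simp [show idx + (k + 1) = idx + k + 1 by omega]
    · rw [if_neg h2]
      have h1 : (((s.drop idx).take (k + 1)).drop k) = [] := by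
        apply List.drop_eq_nil_of_le
        simp [List.length_take, List.length_drop]; omega
      have h3 : buildPyr s (idx + (k + 1)) (k + 1 + 1) = [] := by
        rw [buildPyr, if_neg (by omega)]
      have h4 : goGen s (idx + k + 1) (k + 1) = [] := by
        rw [goGen, if_neg (by omega)]
      rw [h1, show idx + (k + 1) = idx + k + 1 by omega, h4]
      simp
  · rw [if_neg (by omega), if_neg (by omega)]
    simp [diag]
  termination_by s.length - idx
  decreasing_by omega

-- goB at i reads from the running start index i*(i+1)/2
lemma goB_eq_goGen (s : List Char) (i : Nat) :
    goB s i = goGen s (i * (i + 1) / 2) i := by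
  rw [goB, goGen]
  have e1 : i * (i + 3) = i * (i + 1) + i * 2 := by ring
  have h1 : i * (i + 3) / 2 = i * (i + 1) / 2 + i := by
    rw [e1, Nat.add_mul_div_right _ _ (by omega : 0 < 2)]
  by_cases h : i * (i + 3) / 2 < s.length
  · rw [if_pos h, if_pos (by omega)]
    have e2 : (i + 1) * (i + 1 + 1) = i * (i + 1) + (i + 1) * 2 := by ring
    have h2 : (i + 1) * (i + 1 + 1) / 2 = i * (i + 1) / 2 + (i + 1) := by
      rw [e2, Nat.add_mul_div_right _ _ (by omega : 0 < 2)]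
    rw [goB_eq_goGen s (i + 1), h1, h2, ← Nat.add_assoc]
  · rw [if_neg h, if_neg (by omega)]
  termination_by s.length - i * (i + 3) / 2
  decreasing_by
    have h' : (i + 1) * (i + 1 + 3) = i * (i + 3) + (i + 2) * 2 := by ring
    have h2 : (i + 1) * (i + 1 + 3) / 2 = i * (i + 3) / 2 + (i + 2) := by
      rw [h', Nat.add_mul_div_right _ _ (by omega : 0 < 2)]
    omega

-- ===== VERDICT (by name: the statement is the Claim_ definition above) =====
theorem pyramid_cipher_spec : Claim_equal_pyramid_cipher := by
  intro text _
  unfold Spec_pyramid_cipher pyramid_cipher pyramid_cipher_alt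
  set s := (PySem.Str.replace (PySem.Str.upper text) " " "").toList with hs
  simp only []
  rw [outer_fold _ _ _ (le_refl _), List.take_length, List.nil_append,
    diag_buildPyr s 0 0, goB_eq_goGen]
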